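-- pv_equiv track=rewrite | github.com/mratet/advent-of-code_python | solutions/2024/day_12.py | part_2
-- ===== SOURCE A (Python) =====
-- def count_corner(lines, start):
--     x, y = start
--     side = 0
--     for (dx1, dy1), (dx2, dy2) in zip([(1, 0), (0, -1), (-1, 0), (0, 1)], [(0, -1), (-1, 0), (0, 1), (1, 0)]):
--         nx1, ny1 = x + dx1, y + dy1
--         nx2, ny2 = x + dx2, y + dy2
--         if (nx1 < 0) or (nx1 >= len(lines)) or (ny1 < 0) or (ny1 >= len(lines[0])): continue
--         if (nx2 < 0) or (nx2 >= len(lines)) or (ny2 < 0) or (ny2 >= len(lines[0])): continue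
--         dxa = dx1 if dx1 else dx2
--         dya = dy1 if dy1 else dy2
--         nxa, nya = x + dxa, y + dya
--         if lines[nx1][ny1] == lines[x][y] and lines[nx2][ny2] == lines[x][y] and lines[nxa][nya] != lines[x][y]:
--             side += 1
--     return side
--
-- def dfs(lines, start):
--     x, y = start
--     color = lines[x][y]
--     garden = {(x, y)}
--     to_visit = [start]
--     perimeter = 0
--     side = 0
--     while to_visit:
--         x, y = to_visit.pop(0)
--         neigh = []
--         for dx, dy in [(1, 0), (-1, 0), (0, 1), (0, -1)]:
--             nx, ny = x + dx, y + dy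
--             if 0 <= nx < len(lines) and 0 <= ny < len(lines[0]) and lines[nx][ny] == color:
--                 neigh.append((dx, dy))
--                 if (nx, ny) not in garden:
--                     garden.add((nx, ny))
--                     to_visit.append((nx, ny))
--             else:
--                 perimeter += 1
--         if len(neigh) == 1:
--             side += 2
--             continue
--         if len(neigh) == 2:
--             (dx1, dy1), (dx2, dy2) = neigh
--             if dx1 != dx2 and dy1 != dy2:
--                 side += 1
--         side += count_corner(lines, (x, y))
--     if len(garden) == 1:
--         side = 4
--     return garden, perimeter, side
--
-- def part_2(lines):
--     score = 0
--     seen = set()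
--     for x in range(len(lines)):
--         for y in range(len(lines[0])):
--             if (x, y) not in seen:
--                 garden, _ , s= dfs(lines, (x, y))
--                 score += len(garden) * s
--                 seen.update(garden)
--     return score
-- ===== SOURCE B (Python) =====
-- def part_2(lines):
--     h = len(lines)
--     w = len(lines[0]) if lines else 0
--
--     def cell(x, y):
--         if 0 <= x < h and 0 <= y < w:
--             return lines[x][y]
--         return None
--
--     def corners(x, y):
--         v = cell(x, y)
--         n = 0
--         for ax, ay, bx, by in ((1, 0, 0, 1), (0, 1, -1, 0), (-1, 0, 0, -1), (0, -1, 1, 0)):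
--             a = cell(x + ax, y + ay) == v
--             b = cell(x + bx, y + by) == v
--             if a and b:
--                 if cell(x + ax + bx, y + ay + by) != v:
--                     n += 1
--             elif not a and not b:
--                 n += 1
--         return n
--
--     score = 0
--     seen = set()
--     for sx in range(h):
--         for sy in range(w):
--             if (sx, sy) in seen:
--                 continue
--             color = lines[sx][sy]
--             region = {(sx, sy)}
--             queue = [(sx, sy)]
--             i = 0
--             sides = 0
--             while i < len(queue):
--                 x, y = queue[i]
--                 i += 1
--                 sides += corners(x, y)
--                 for n in ((x + 1, y), (x - 1, y), (x, y + 1), (x, y - 1)):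
--                     if cell(n[0], n[1]) == color and n not in region:
--                         region.add(n)
--                         queue.append(n)
--             score += len(region) * sides
--             seen |= region
--     return score
-- ===== Notes on version B (the rewrite author's own statement) =====
-- stated objective: simpler
-- what changed: B keeps the flood fill (with an index-advancing queue instead of pop(0)) but replaces A's side bookkeeping (perimeter tracking, neighbour-degree special cases: singleton region -> 4, degree-1 -> +2, perpendicular degree-2 -> +1, plus count_corner) with the standard rule sides-of-a-region = corners-of-a-region, counted per cell and quadrant via an Option-returning cell accessor (convex: both orthogonal neighbours differ, concave: both same but the diagonal differs).
import Mathlib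
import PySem

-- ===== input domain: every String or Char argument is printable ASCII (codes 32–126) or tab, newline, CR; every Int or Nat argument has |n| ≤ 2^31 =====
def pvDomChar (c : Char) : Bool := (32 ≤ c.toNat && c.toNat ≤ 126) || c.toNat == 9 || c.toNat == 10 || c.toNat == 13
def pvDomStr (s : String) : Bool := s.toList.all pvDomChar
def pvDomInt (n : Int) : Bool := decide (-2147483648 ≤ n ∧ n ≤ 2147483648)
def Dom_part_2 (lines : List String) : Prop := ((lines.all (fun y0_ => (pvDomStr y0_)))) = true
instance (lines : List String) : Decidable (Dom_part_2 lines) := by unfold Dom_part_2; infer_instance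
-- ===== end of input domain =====

-- B keeps the flood fill (index queue instead of pop(0)) but replaces A's side
-- bookkeeping (perimeter, degree special cases, count_corner) with the standard
-- sides-of-a-region = corners-of-a-region count, per cell and quadrant. Objective: simpler.

-- ===== PORT A =====
def pvW (lines : List String) : Int := PySem.Str.len (lines.headD "")

-- lines[x][y]; A only evaluates it behind in-bounds guards, where it is exact (Pre_ rules out short rows)
def pvGetc (lines : List String) (x y : Int) : Char :=
  ((PySem.List.pyGet? lines x).bind fun s => PySem.Str.pyGet? s y).getD ' '

-- 0 <= x < len(lines) and 0 <= y < len(lines[0])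
def pvInB (lines : List String) (x y : Int) : Bool :=
  decide (0 ≤ x) && decide (x < (lines.length : Int)) && decide (0 ≤ y) && decide (y < pvW lines)

-- in bounds and lines[x][y] == c
def pvIsC (lines : List String) (c : Char) (x y : Int) : Bool :=
  pvInB lines x y && (pvGetc lines x y == c)

-- the compound test '0 <= nx < h and 0 <= ny < w and lines[nx][ny] == color' for n = (x,y)+d
def pvCond (lines : List String) (color : Char) (x y : Int) (d : Int × Int) : Bool :=
  pvIsC lines color (x + d.1) (y + d.2)

-- zip([(1,0),(0,-1),(-1,0),(0,1)], [(0,-1),(-1,0),(0,1),(1,0)]), written out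
def pvCCPairs : List ((Int × Int) × Int × Int) :=
  [((1,0),(0,-1)), ((0,-1),(-1,0)), ((-1,0),(0,1)), ((0,1),(1,0))]

-- body of count_corner's loop
def pvCCStep (lines : List String) (x y : Int) (side : Int) (p : (Int × Int) × Int × Int) : Int :=
  let dx1 := p.1.1; let dy1 := p.1.2; let dx2 := p.2.1; let dy2 := p.2.2
  let nx1 := x + dx1; let ny1 := y + dy1
  let nx2 := x + dx2; let ny2 := y + dy2
  if !(pvInB lines nx1 ny1) then side
  else if !(pvInB lines nx2 ny2) then side
  else
    let dxa := if dx1 ≠ 0 then dx1 else dx2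
    let dya := if dy1 ≠ 0 then dy1 else dy2
    if (pvGetc lines nx1 ny1 == pvGetc lines x y) && (pvGetc lines nx2 ny2 == pvGetc lines x y)
        && !(pvGetc lines (x + dxa) (y + dya) == pvGetc lines x y)
    then side + 1 else side

def count_corner (lines : List String) (start : Int × Int) : Int :=
  pvCCPairs.foldl (pvCCStep lines start.1 start.2) 0

def pvDirs : List (Int × Int) := [(1,0),(-1,0),(0,1),(0,-1)]

-- one direction step of dfs's neighbour loop; state = (neigh, garden, to_visit, perimeter)
def pvStepA (lines : List String) (color : Char) (x y : Int)
    (st : List (Int × Int) × PySem.Set (Int × Int) × List (Int × Int) × Int) (d : Int × Int) :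
    List (Int × Int) × PySem.Set (Int × Int) × List (Int × Int) × Int :=
  if pvCond lines color x y d then
    if PySem.Set.contains st.2.1 (x + d.1, y + d.2) then (st.1 ++ [d], st.2.1, st.2.2.1, st.2.2.2)
    else (st.1 ++ [d], PySem.Set.add st.2.1 (x + d.1, y + d.2), st.2.2.1 ++ [(x + d.1, y + d.2)], st.2.2.2)
  else (st.1, st.2.1, st.2.2.1, st.2.2.2 + 1)

-- dfs's 'while to_visit' loop (fuel bounds the number of pops; h*w+1 always suffices)
def pvLoopA (lines : List String) (color : Char) :
    Nat → List (Int × Int) → PySem.Set (Int × Int) → Int → Int →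
    PySem.Set (Int × Int) × Int × Int
  | 0, _, g, per, side => (g, per, side)
  | _+1, [], g, per, side => (g, per, side)
  | fuel+1, c :: rest, g, per, side =>
      let r := pvDirs.foldl (pvStepA lines color c.1 c.2) ([], g, rest, per)
      let side :=
        if r.1.length == 1 then side + 2
        else (if r.1.length == 2 then
                match r.1 with
                | [d1, d2] => if decide (d1.1 ≠ d2.1) && decide (d1.2 ≠ d2.2) then side + 1 else side
                | _ => side
              else side) + count_corner lines c
      pvLoopA lines color fuel r.2.2.1 r.2.1 r.2.2.2 side

def dfs (lines : List String) (start : Int × Int) : PySem.Set (Int × Int) × Int × Int :=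
  let color := pvGetc lines start.1 start.2
  let r := pvLoopA lines color (lines.length * (pvW lines).toNat + 1) [start]
      (PySem.Set.ofList [start]) 0 0
  if PySem.Set.len r.1 == 1 then (r.1, r.2.1, 4) else r

def part_2 (lines : List String) : Int :=
  ((PySem.List.pyRange 0 (lines.length : Int) 1).foldl (fun (st : Int × PySem.Set (Int × Int)) x =>
    (PySem.List.pyRange 0 (pvW lines) 1).foldl (fun st y =>
      if PySem.Set.contains st.2 (x, y) then st
      else
        let r := dfs lines (x, y)
        (st.1 + PySem.Set.len r.1 * r.2.2, PySem.Set.update st.2 r.1)) st)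
    ((0:Int), (PySem.Set.empty : PySem.Set (Int × Int)))).1

-- ===== PORT B =====
-- w = len(lines[0]) if lines else 0
def pvGridW (lines : List String) : Int :=
  if lines.isEmpty then 0 else PySem.Str.len (lines.headD "")

-- cell(x, y): lines[x][y] if inside the h×w rectangle else None
def pvCellB (lines : List String) (x y : Int) : Option Char :=
  if 0 ≤ x ∧ x < (lines.length : Int) ∧ 0 ≤ y ∧ y < pvGridW lines then
    (PySem.List.pyGet? lines x).bind fun s => PySem.Str.pyGet? s y
  else none

-- the quadrant table ((1,0,0,1), (0,1,-1,0), (-1,0,0,-1), (0,-1,1,0))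
def pvQuadList : List (Int × Int × Int × Int) := [(1,0,0,1), (0,1,-1,0), (-1,0,0,-1), (0,-1,1,0)]

-- body of corners' quadrant loop
def pvCornStep (lines : List String) (x y : Int) (v : Option Char) (n : Int)
    (q : Int × Int × Int × Int) : Int :=
  let a := pvCellB lines (x + q.1) (y + q.2.1) == v
  let b := pvCellB lines (x + q.2.2.1) (y + q.2.2.2) == v
  if a && b then (if !(pvCellB lines (x + q.1 + q.2.2.1) (y + q.2.1 + q.2.2.2) == v) then n + 1 else n)
  else if !a && !b then n + 1 else n

def pvCorners (lines : List String) (x y : Int) : Int :=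
  pvQuadList.foldl (pvCornStep lines x y (pvCellB lines x y)) 0

-- ((x+1, y), (x-1, y), (x, y+1), (x, y-1))
def pvNbrs (x y : Int) : List (Int × Int) := [(x + 1, y), (x - 1, y), (x, y + 1), (x, y - 1)]

-- one neighbour step of B's fill; state = (region, queue)
def pvVisit (lines : List String) (color : Char)
    (st : PySem.Set (Int × Int) × List (Int × Int)) (n : Int × Int) :
    PySem.Set (Int × Int) × List (Int × Int) :=
  if (pvCellB lines n.1 n.2 == some color) && !(PySem.Set.contains st.1 n) then
    (PySem.Set.add st.1 n, st.2 ++ [n])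
  else st

-- B's 'while i < len(queue)' loop, ported as recursion on the unprocessed suffix
-- (exact: the queue is append-only and i only advances)
def pvFill (lines : List String) (color : Char) :
    Nat → PySem.Set (Int × Int) → List (Int × Int) → Int → PySem.Set (Int × Int) × Int
  | 0, reg, _, sides => (reg, sides)
  | _+1, reg, [], sides => (reg, sides)
  | fuel+1, reg, c :: rest, sides =>
      let st := (pvNbrs c.1 c.2).foldl (pvVisit lines color) (reg, rest)
      pvFill lines color fuel st.1 st.2 (sides + pvCorners lines c.1 c.2)

def part_2_alt (lines : List String) : Int :=
  ((PySem.List.pyRange 0 (lines.length : Int) 1).foldl (fun (st : Int × PySem.Set (Int × Int)) sx =>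
    (PySem.List.pyRange 0 (pvGridW lines) 1).foldl (fun st sy =>
      if PySem.Set.contains st.2 (sx, sy) then st
      else
        let color := (pvCellB lines sx sy).getD ' '
        let r := pvFill lines color (lines.length * (pvGridW lines).toNat + 1)
          (PySem.Set.ofList [(sx, sy)]) [(sx, sy)] 0
        (st.1 + PySem.Set.len r.1 * r.2, PySem.Set.update st.2 r.1)) st)
    ((0:Int), (PySem.Set.empty : PySem.Set (Int × Int)))).1

-- ===== PRECONDITION & SPEC =====
-- Pre_ excludes exactly the inputs where A raises IndexError: a row strictly shorter
-- than lines[0] (every column y < len(lines[0]) of every row is eventually read).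
def Pre_part_2 (lines : List String) : Prop :=
  ∀ l ∈ lines, PySem.Str.len (lines.headD "") ≤ PySem.Str.len l
instance (lines : List String) : Decidable (Pre_part_2 lines) := by unfold Pre_part_2; infer_instance

def pvWitness_part_2 : List String := ["AAB", "ABB"]

def Spec_part_2 (lines : List String) (out : Int) : Prop := out = part_2_alt lines
instance (lines : List String) (out : Int) : Decidable (Spec_part_2 lines out) := by unfold Spec_part_2; infer_instance

-- ===== CLAIM (what is proved, stated in full; the proofs are below) =====
def Claim_equal_part_2 : Prop := ∀ (lines : List String), Dom_part_2 lines → Pre_part_2 lines → Spec_part_2 lines (part_2 lines)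

-- ===== LEMMAS AND PROOFS =====

-- the two width expressions agree
lemma gridW_eq (lines : List String) : pvGridW lines = pvW lines := by
  cases lines <;> simp [pvGridW, pvW, PySem.Str.len]

-- under Pre_, B's cell accessor is A's guarded read
lemma cellB_eq (lines : List String) (hPre : Pre_part_2 lines) (x y : Int) :
    pvCellB lines x y = if pvInB lines x y then some (pvGetc lines x y) else none := by
  unfold pvCellB
  rw [gridW_eq]
  by_cases h : pvInB lines x y = true
  · rw [if_pos h]
    have h' := h
    simp only [pvInB, Bool.and_eq_true, decide_eq_true_eq] at h'
    obtain ⟨⟨⟨hx0, hxl⟩, hy0⟩, hyw⟩ := h'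
    have hgl : PySem.List.pyGet? lines x = some lines[x.toNat] :=
      PySem.List.pyGet?_eq_some_getElem lines hx0 hxl
    have hrow : lines[x.toNat] ∈ lines := List.getElem_mem _
    have hlen : pvW lines ≤ PySem.Str.len lines[x.toNat] := hPre _ hrow
    have hyl : y < ((lines[x.toNat]).toList.length : Int) := by
      have := PySem.Str.len_eq lines[x.toNat]; omega
    have hgs : PySem.Str.pyGet? lines[x.toNat] y
        = some ((lines[x.toNat]).toList[y.toNat]) := by
      rw [PySem.Str.pyGet?_eq, PySem.Chars.pyGet?_eq_listPyGet?]
      exact PySem.List.pyGet?_eq_some_getElem _ hy0 hyl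
    have hgs' : PySem.List.pyGet? (lines[x.toNat]).toList y
        = some ((lines[x.toNat]).toList[y.toNat]) := by
      simpa [PySem.Str.pyGet?_eq, PySem.Chars.pyGet?_eq_listPyGet?] using hgs
    rw [if_pos ⟨hx0, hxl, hy0, hyw⟩]
    simp [pvGetc, hgl, hgs']
  · rw [if_neg h, if_neg]
    intro hcond
    apply h
    simp only [pvInB, Bool.and_eq_true, decide_eq_true_eq]
    exact ⟨⟨⟨hcond.1, hcond.2.1⟩, hcond.2.2.1⟩, hcond.2.2.2⟩

lemma cellB_beq (lines : List String) (hPre : Pre_part_2 lines) (c : Char) (x y : Int) :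
    (pvCellB lines x y == some c) = pvIsC lines c x y := by
  rw [cellB_eq lines hPre]
  by_cases h : pvInB lines x y <;> simp [h, pvIsC]

lemma pvInB_mix (lines : List String) (x1 y1 x2 y2 : Int)
    (h1 : pvInB lines x1 y1 = true) (h2 : pvInB lines x2 y2 = true) :
    pvInB lines x1 y2 = true := by
  simp only [pvInB, Bool.and_eq_true, decide_eq_true_eq] at *
  exact ⟨⟨⟨h1.1.1.1, h1.1.1.2⟩, h2.1.2⟩, h2.2⟩

-- canonical form of one quadrant of count_corner
lemma quad_term (lines : List String) (c : Char) (px py qx qy rx ry s : Int)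
    (hmix : pvInB lines px py = true → pvInB lines qx qy = true → pvInB lines rx ry = true) :
    (if !(pvInB lines px py) then s
     else if !(pvInB lines qx qy) then s
     else if (pvGetc lines px py == c) && (pvGetc lines qx qy == c) && !(pvGetc lines rx ry == c)
       then s + 1 else s)
    = if pvIsC lines c px py && pvIsC lines c qx qy && !(pvIsC lines c rx ry) then s + 1 else s := by
  by_cases hp : pvInB lines px py = true
  · by_cases hq : pvInB lines qx qy = true
    · have hr := hmix hp hq
      simp [pvIsC, hp, hq, hr]
    · simp [pvIsC, hp, Bool.eq_false_iff.2 hq]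
  · simp [pvIsC, Bool.eq_false_iff.2 hp]

-- truth-table forms of the two side counts
def ccFun (b1 b2 b3 b4 epp epm emp emm : Bool) : Int :=
  (if b1 && b4 && !epm then 1 else 0) + (if b4 && b2 && !emm then 1 else 0)
  + (if b2 && b3 && !emp then 1 else 0) + (if b3 && b1 && !epp then 1 else 0)

def cbFun (b1 b2 b3 b4 epp epm emp emm : Bool) : Int :=
  (if b1 && b3 then (if !epp then 1 else 0) else if !b1 && !b3 then 1 else 0)
  + (if b3 && b2 then (if !emp then 1 else 0) else if !b3 && !b2 then 1 else 0)
  + (if b2 && b4 then (if !emm then 1 else 0) else if !b2 && !b4 then 1 else 0)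
  + (if b4 && b1 then (if !epm then 1 else 0) else if !b4 && !b1 then 1 else 0)

def incAFun (b1 b2 b3 b4 : Bool) (cc : Int) : Int :=
  let deg : Int := (if b1 then 1 else 0) + (if b2 then 1 else 0) + (if b3 then 1 else 0) + (if b4 then 1 else 0)
  if deg = 1 then 2
  else (if deg = 2 ∧ ¬(b1 ∧ b2) ∧ ¬(b3 ∧ b4) then 1 else 0) + cc

lemma combo (b1 b2 b3 b4 epp epm emp emm : Bool) (h : (b1 || b2 || b3 || b4) = true) :
    incAFun b1 b2 b3 b4 (ccFun b1 b2 b3 b4 epp epm emp emm) = cbFun b1 b2 b3 b4 epp epm emp emm := by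
  revert h; revert b1 b2 b3 b4 epp epm emp emm; decide

lemma cbFun_lonely (epp epm emp emm : Bool) :
    cbFun false false false false epp epm emp emm = 4 := by
  revert epp epm emp emm; decide

lemma ccq1 (lines : List String) (c : Char) (x y : Int) (hc : pvGetc lines x y = c) (s : Int) :
    pvCCStep lines x y s ((1,0),(0,-1))
      = if pvIsC lines c (x+1) y && pvIsC lines c x (y-1) && !(pvIsC lines c (x+1) (y-1)) then s+1 else s := by
  simp only [pvCCStep, hc, add_zero, ne_eq, one_ne_zero, not_false_eq_true, if_true,
    show ¬((0:Int) ≠ 0) from by norm_num, if_false]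
  rw [show y + (-1 : Int) = y - 1 from by ring]
  exact quad_term lines c (x+1) y x (y-1) (x+1) (y-1) s
    (fun h1 h2 => pvInB_mix lines (x+1) y x (y-1) h1 h2)

lemma ccq2 (lines : List String) (c : Char) (x y : Int) (hc : pvGetc lines x y = c) (s : Int) :
    pvCCStep lines x y s ((0,-1),(-1,0))
      = if pvIsC lines c x (y-1) && pvIsC lines c (x-1) y && !(pvIsC lines c (x-1) (y-1)) then s+1 else s := by
  simp only [pvCCStep, hc, add_zero, ne_eq, not_false_eq_true, if_true,
    show ¬((0:Int) ≠ 0) from by norm_num, if_false,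
    show ((-1:Int) ≠ 0) from by norm_num]
  rw [show y + (-1 : Int) = y - 1 from by ring, show x + (-1 : Int) = x - 1 from by ring]
  exact quad_term lines c x (y-1) (x-1) y (x-1) (y-1) s
    (fun h1 h2 => pvInB_mix lines (x-1) y x (y-1) h2 h1)

lemma ccq3 (lines : List String) (c : Char) (x y : Int) (hc : pvGetc lines x y = c) (s : Int) :
    pvCCStep lines x y s ((-1,0),(0,1))
      = if pvIsC lines c (x-1) y && pvIsC lines c x (y+1) && !(pvIsC lines c (x-1) (y+1)) then s+1 else s := by
  simp only [pvCCStep, hc, add_zero, ne_eq, not_false_eq_true, if_true,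
    show ¬((0:Int) ≠ 0) from by norm_num, if_false,
    show ((-1:Int) ≠ 0) from by norm_num]
  rw [show x + (-1 : Int) = x - 1 from by ring]
  exact quad_term lines c (x-1) y x (y+1) (x-1) (y+1) s
    (fun h1 h2 => pvInB_mix lines (x-1) y x (y+1) h1 h2)

lemma ccq4 (lines : List String) (c : Char) (x y : Int) (hc : pvGetc lines x y = c) (s : Int) :
    pvCCStep lines x y s ((0,1),(1,0))
      = if pvIsC lines c x (y+1) && pvIsC lines c (x+1) y && !(pvIsC lines c (x+1) (y+1)) then s+1 else s := by
  simp only [pvCCStep, hc, add_zero, ne_eq, one_ne_zero, not_false_eq_true, if_true,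
    show ¬((0:Int) ≠ 0) from by norm_num, if_false]
  exact quad_term lines c x (y+1) (x+1) y (x+1) (y+1) s
    (fun h1 h2 => pvInB_mix lines (x+1) y x (y+1) h2 h1)

lemma cc_canon (lines : List String) (c : Char) (x y : Int) (hc : pvGetc lines x y = c) :
    count_corner lines (x, y) =
      ccFun (pvIsC lines c (x + 1) y) (pvIsC lines c (x - 1) y)
        (pvIsC lines c x (y + 1)) (pvIsC lines c x (y - 1))
        (pvIsC lines c (x + 1) (y + 1)) (pvIsC lines c (x + 1) (y - 1))
        (pvIsC lines c (x - 1) (y + 1)) (pvIsC lines c (x - 1) (y - 1)) := by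
  simp only [count_corner, pvCCPairs, List.foldl_cons, List.foldl_nil]
  rw [ccq1 lines c x y hc, ccq2 lines c x y hc, ccq3 lines c x y hc, ccq4 lines c x y hc]
  simp only [ccFun]
  split_ifs <;> omega
lemma cellB_self (lines : List String) (hPre : Pre_part_2 lines) (c : Char) (x y : Int)
    (hin : pvInB lines x y = true) (hc : pvGetc lines x y = c) :
    pvCellB lines x y = some c := by
  rw [cellB_eq lines hPre, if_pos hin, hc]

lemma cbq1 (lines : List String) (hPre : Pre_part_2 lines) (c : Char) (x y : Int)
    (hin : pvInB lines x y = true) (hc : pvGetc lines x y = c) (n : Int) :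
    pvCornStep lines x y (pvCellB lines x y) n (1,0,0,1)
      = if pvIsC lines c (x+1) y && pvIsC lines c x (y+1) then
          (if !(pvIsC lines c (x+1) (y+1)) then n+1 else n)
        else if !(pvIsC lines c (x+1) y) && !(pvIsC lines c x (y+1)) then n+1 else n := by
  rw [cellB_self lines hPre c x y hin hc]
  simp only [pvCornStep, cellB_beq lines hPre, add_zero]
lemma cbq2 (lines : List String) (hPre : Pre_part_2 lines) (c : Char) (x y : Int)
    (hin : pvInB lines x y = true) (hc : pvGetc lines x y = c) (n : Int) :
    pvCornStep lines x y (pvCellB lines x y) n (0,1,-1,0)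
      = if pvIsC lines c x (y+1) && pvIsC lines c (x-1) y then
          (if !(pvIsC lines c (x-1) (y+1)) then n+1 else n)
        else if !(pvIsC lines c x (y+1)) && !(pvIsC lines c (x-1) y) then n+1 else n := by
  rw [cellB_self lines hPre c x y hin hc]
  simp only [pvCornStep, cellB_beq lines hPre, add_zero]
  rw [show x + (-1 : Int) = x - 1 from by ring]

lemma cbq3 (lines : List String) (hPre : Pre_part_2 lines) (c : Char) (x y : Int)
    (hin : pvInB lines x y = true) (hc : pvGetc lines x y = c) (n : Int) :
    pvCornStep lines x y (pvCellB lines x y) n (-1,0,0,-1)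
      = if pvIsC lines c (x-1) y && pvIsC lines c x (y-1) then
          (if !(pvIsC lines c (x-1) (y-1)) then n+1 else n)
        else if !(pvIsC lines c (x-1) y) && !(pvIsC lines c x (y-1)) then n+1 else n := by
  rw [cellB_self lines hPre c x y hin hc]
  simp only [pvCornStep, cellB_beq lines hPre, add_zero]
  rw [show x + (-1 : Int) = x - 1 from by ring, show y + (-1 : Int) = y - 1 from by ring]

lemma cbq4 (lines : List String) (hPre : Pre_part_2 lines) (c : Char) (x y : Int)
    (hin : pvInB lines x y = true) (hc : pvGetc lines x y = c) (n : Int) :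
    pvCornStep lines x y (pvCellB lines x y) n (0,-1,1,0)
      = if pvIsC lines c x (y-1) && pvIsC lines c (x+1) y then
          (if !(pvIsC lines c (x+1) (y-1)) then n+1 else n)
        else if !(pvIsC lines c x (y-1)) && !(pvIsC lines c (x+1) y) then n+1 else n := by
  rw [cellB_self lines hPre c x y hin hc]
  simp only [pvCornStep, cellB_beq lines hPre, add_zero]
  rw [show y + (-1 : Int) = y - 1 from by ring]

lemma corners_canon (lines : List String) (hPre : Pre_part_2 lines) (c : Char) (x y : Int)
    (hin : pvInB lines x y = true) (hc : pvGetc lines x y = c) :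
    pvCorners lines x y =
      cbFun (pvIsC lines c (x + 1) y) (pvIsC lines c (x - 1) y)
        (pvIsC lines c x (y + 1)) (pvIsC lines c x (y - 1))
        (pvIsC lines c (x + 1) (y + 1)) (pvIsC lines c (x + 1) (y - 1))
        (pvIsC lines c (x - 1) (y + 1)) (pvIsC lines c (x - 1) (y - 1)) := by
  simp only [pvCorners, pvQuadList, List.foldl_cons, List.foldl_nil]
  rw [cbq1 lines hPre c x y hin hc, cbq2 lines hPre c x y hin hc,
    cbq3 lines hPre c x y hin hc, cbq4 lines hPre c x y hin hc]
  simp only [cbFun]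
  generalize pvIsC lines c (x + 1) (y + 1) = epp
  generalize pvIsC lines c (x + 1) (y - 1) = epm
  generalize pvIsC lines c (x - 1) (y + 1) = emp
  generalize pvIsC lines c (x - 1) (y - 1) = emm
  generalize pvIsC lines c (x + 1) y = b1
  generalize pvIsC lines c (x - 1) y = b2
  generalize pvIsC lines c x (y + 1) = b3
  generalize pvIsC lines c x (y - 1) = b4
  revert b1 b2 b3 b4 epp epm emp emm
  decide

lemma sideA_canon (lines : List String) (c : Char) (x y side : Int) (_hc : pvGetc lines x y = c) :
    (if (pvDirs.filter (pvCond lines c x y)).length == 1 then side + 2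
     else (if (pvDirs.filter (pvCond lines c x y)).length == 2 then
             match pvDirs.filter (pvCond lines c x y) with
             | [d1, d2] => if decide (d1.1 ≠ d2.1) && decide (d1.2 ≠ d2.2) then side + 1 else side
             | _ => side
           else side) + count_corner lines (x, y))
    = side + incAFun (pvIsC lines c (x + 1) y) (pvIsC lines c (x - 1) y)
        (pvIsC lines c x (y + 1)) (pvIsC lines c x (y - 1)) (count_corner lines (x, y)) := by
  have e1 : x + (-1 : Int) = x - 1 := by ring
  have e2 : y + (-1 : Int) = y - 1 := by ring
  by_cases h1 : pvIsC lines c (x+1) y = true <;>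
    by_cases h2 : pvIsC lines c (x-1) y = true <;>
      by_cases h3 : pvIsC lines c x (y+1) = true <;>
        by_cases h4 : pvIsC lines c x (y-1) = true <;>
          simp [pvDirs, pvCond, incAFun, add_zero, e1, e2, h1, h2, h3, h4] <;>
            try ring

-- A's neighbour fold: the neigh component is a filter
lemma foldA_neigh (lines : List String) (color : Char) (x y : Int) :
    ∀ (l : List (Int × Int)) (st : List (Int × Int) × PySem.Set (Int × Int) × List (Int × Int) × Int),
    (l.foldl (pvStepA lines color x y) st).1 = st.1 ++ l.filter (pvCond lines color x y)
  | [], st => by simp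
  | d :: l, st => by
    simp only [List.foldl_cons, List.filter_cons]
    rw [foldA_neigh lines color x y l (pvStepA lines color x y st d)]
    by_cases h1 : pvCond lines color x y d = true <;>
      by_cases h2 : (x + d.1, y + d.2) ∈ st.2.1 <;>
        simp [pvStepA, h1, h2]

lemma nbrs_eq (x y : Int) : pvNbrs x y = pvDirs.map (fun d => (x + d.1, y + d.2)) := by
  simp [pvNbrs, pvDirs]
  omega

-- projection of A's neighbour fold onto B's
lemma fold_proj (lines : List String) (hPre : Pre_part_2 lines) (c : Char) (x y : Int) :
    ∀ (ds : List (Int × Int)) (st : List (Int × Int) × PySem.Set (Int × Int) × List (Int × Int) × Int),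
    ((ds.foldl (pvStepA lines c x y) st).2.1, (ds.foldl (pvStepA lines c x y) st).2.2.1)
      = (ds.map (fun d => (x + d.1, y + d.2))).foldl (pvVisit lines c) (st.2.1, st.2.2.1)
  | [], st => rfl
  | d :: ds, st => by
    simp only [List.foldl_cons, List.map_cons]
    rw [fold_proj lines hPre c x y ds (pvStepA lines c x y st d)]
    congr 1
    simp only [pvStepA, pvVisit, cellB_beq lines hPre, pvCond]
    by_cases h1 : pvIsC lines c (x + d.1) (y + d.2) = true <;>
      by_cases h2 : (x + d.1, y + d.2) ∈ st.2.1 <;>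
        simp [h1, h2]

-- membership facts about B's neighbour fold
lemma mem_visit_queue (lines : List String) (c : Char) :
    ∀ (ns : List (Int × Int)) (st : PySem.Set (Int × Int) × List (Int × Int)) (e : Int × Int),
    e ∈ (ns.foldl (pvVisit lines c) st).2 →
      e ∈ st.2 ∨ (e ∈ ns ∧ (pvCellB lines e.1 e.2 == some c) = true)
  | [], st, e => fun h => Or.inl h
  | n :: ns, st, e => by
    intro h
    rcases mem_visit_queue lines c ns _ e h with h' | ⟨hn, hc⟩
    · simp only [pvVisit] at h'
      split_ifs at h' with hg
      · simp only [List.mem_append, List.mem_singleton] at h'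
        rcases h' with h' | h'
        · exact Or.inl h'
        · subst h'
          simp only [Bool.and_eq_true] at hg
          exact Or.inr ⟨List.mem_cons_self .., hg.1⟩
      · exact Or.inl h'
    · exact Or.inr ⟨List.mem_cons_of_mem _ hn, hc⟩

lemma visit_garden_mono (lines : List String) (c : Char) :
    ∀ (ns : List (Int × Int)) (st : PySem.Set (Int × Int) × List (Int × Int)) (e : Int × Int),
    e ∈ st.1 → e ∈ (ns.foldl (pvVisit lines c) st).1
  | [], _, _ => fun h => h
  | n :: ns, st, e => by
    intro h
    apply visit_garden_mono lines c ns _ e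
    simp only [pvVisit]
    split_ifs with hg
    · exact (PySem.Set.mem_add ..).2 (Or.inl h)
    · exact h

lemma visit_garden_of_cond (lines : List String) (c : Char) :
    ∀ (ns : List (Int × Int)) (st : PySem.Set (Int × Int) × List (Int × Int)) (n : Int × Int),
    n ∈ ns → (pvCellB lines n.1 n.2 == some c) = true →
      n ∈ (ns.foldl (pvVisit lines c) st).1
  | [], _, _ => by simp
  | n' :: ns, st, n => by
    intro hmem hc
    rcases List.mem_cons.1 hmem with rfl | hmem'
    · rw [List.foldl_cons]
      apply visit_garden_mono
      by_cases hg : n ∈ st.1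
      · simp [pvVisit, hg]
      · simp [pvVisit, hc, hg]
    · rw [List.foldl_cons]
      exact visit_garden_of_cond lines c ns _ n hmem' hc

lemma fill_garden_mono (lines : List String) (c : Char) :
    ∀ (fuel : Nat) (reg : PySem.Set (Int × Int)) (q : List (Int × Int)) (s : Int) (e : Int × Int),
    e ∈ reg → e ∈ (pvFill lines c fuel reg q s).1
  | 0, _, _, _, _ => fun h => h
  | _+1, _, [], _, _ => fun h => h
  | fuel+1, reg, c0 :: rest, s, e => by
    intro h
    simp only [pvFill]
    exact fill_garden_mono lines c fuel _ _ _ e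
      (visit_garden_mono lines c _ (reg, rest) e h)

-- a queue cell: in bounds, of the region's colour, with at least one same-colour neighbour
def pvGood (lines : List String) (c : Char) (cell : Int × Int) : Prop :=
  pvInB lines cell.1 cell.2 = true ∧ pvGetc lines cell.1 cell.2 = c ∧
    ∃ d ∈ pvDirs, pvIsC lines c (cell.1 + d.1) (cell.2 + d.2) = true

lemma good_of_nbr (lines : List String) (hPre : Pre_part_2 lines) (c : Char) (x y : Int)
    (hx : pvInB lines x y = true) (hcx : pvGetc lines x y = c) (n : Int × Int)
    (hn : n ∈ pvNbrs x y) (hc : (pvCellB lines n.1 n.2 == some c) = true) :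
    pvGood lines c n := by
  rw [cellB_beq lines hPre] at hc
  have hself : pvIsC lines c x y = true := by simp [pvIsC, hx, hcx]
  have hic := hc
  simp only [pvIsC, Bool.and_eq_true, beq_iff_eq] at hic
  refine ⟨hic.1, hic.2, ?_⟩
  simp only [pvNbrs, List.mem_cons, List.not_mem_nil, or_false] at hn
  rcases hn with rfl | rfl | rfl | rfl
  · exact ⟨(-1, 0), by simp [pvDirs], by
      simpa [show x + 1 + (-1 : Int) = x from by ring] using hself⟩
  · exact ⟨(1, 0), by simp [pvDirs], by
      simpa [show x - 1 + (1 : Int) = x from by ring] using hself⟩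
  · exact ⟨(0, -1), by simp [pvDirs], by
      simpa [show y + 1 + (-1 : Int) = y from by ring] using hself⟩
  · exact ⟨(0, 1), by simp [pvDirs], by
      simpa [show y - 1 + (1 : Int) = y from by ring] using hself⟩

-- the loops agree: same garden, and A's side leads B's by the initial offset
lemma loop_eq (lines : List String) (hPre : Pre_part_2 lines) (c : Char) :
    ∀ (fuel : Nat) (q : List (Int × Int)) (g : PySem.Set (Int × Int)) (per sa sb : Int),
    (∀ cell ∈ q, pvGood lines c cell) →
    (pvLoopA lines c fuel q g per sa).1 = (pvFill lines c fuel g q sb).1 ∧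
    (pvLoopA lines c fuel q g per sa).2.2 = (pvFill lines c fuel g q sb).2 + (sa - sb) := by
  intro fuel
  induction fuel with
  | zero =>
    intro q g per sa sb _
    exact ⟨rfl, by simp only [pvLoopA, pvFill]; ring⟩
  | succ f ih =>
    intro q g per sa sb hq
    match q with
    | [] => exact ⟨rfl, by simp only [pvLoopA, pvFill]; ring⟩
    | c0 :: rest =>
      obtain ⟨hin0, hc0, hnb⟩ := hq c0 (List.mem_cons_self ..)
      have hproj := fold_proj lines hPre c c0.1 c0.2 pvDirs ([], g, rest, per)
      rw [← nbrs_eq c0.1 c0.2] at hproj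
      have hG := congrArg Prod.fst hproj
      have hQ := congrArg Prod.snd hproj
      simp only at hG hQ
      have hneigh := foldA_neigh lines c c0.1 c0.2 pvDirs ([], g, rest, per)
      simp only [List.nil_append] at hneigh
      have hgood : ∀ cell ∈ ((pvNbrs c0.1 c0.2).foldl (pvVisit lines c) (g, rest)).2,
          pvGood lines c cell := by
        intro e he
        rcases mem_visit_queue lines c _ _ e he with h | ⟨hn, hcell⟩
        · exact hq e (List.mem_cons_of_mem _ h)
        · exact good_of_nbr lines hPre c c0.1 c0.2 hin0 hc0 e hn hcell
      have hbor : (pvIsC lines c (c0.1 + 1) c0.2 || pvIsC lines c (c0.1 - 1) c0.2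
          || pvIsC lines c c0.1 (c0.2 + 1) || pvIsC lines c c0.1 (c0.2 - 1)) = true := by
        obtain ⟨d, hd, hdc⟩ := hnb
        simp only [pvDirs, List.mem_cons, List.not_mem_nil, or_false] at hd
        rcases hd with rfl | rfl | rfl | rfl <;>
          simp only [add_zero, show c0.1 + (-1 : Int) = c0.1 - 1 from by ring,
            show c0.2 + (-1 : Int) = c0.2 - 1 from by ring] at hdc <;>
          simp [hdc]
      have hK : (if ((pvDirs.filter (pvCond lines c c0.1 c0.2)).length == 1) = true then sa + 2
          else (if ((pvDirs.filter (pvCond lines c c0.1 c0.2)).length == 2) = true then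
                  match pvDirs.filter (pvCond lines c c0.1 c0.2) with
                  | [d1, d2] => if (decide (d1.1 ≠ d2.1) && decide (d1.2 ≠ d2.2)) = true then sa + 1 else sa
                  | _ => sa
                else sa) + count_corner lines c0)
          = sa + cbFun (pvIsC lines c (c0.1 + 1) c0.2) (pvIsC lines c (c0.1 - 1) c0.2)
              (pvIsC lines c c0.1 (c0.2 + 1)) (pvIsC lines c c0.1 (c0.2 - 1))
              (pvIsC lines c (c0.1 + 1) (c0.2 + 1)) (pvIsC lines c (c0.1 + 1) (c0.2 - 1))
              (pvIsC lines c (c0.1 - 1) (c0.2 + 1)) (pvIsC lines c (c0.1 - 1) (c0.2 - 1)) := by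
        have h0 : c0 = (c0.1, c0.2) := rfl
        rw [h0, sideA_canon lines c c0.1 c0.2 sa hc0,
          cc_canon lines c c0.1 c0.2 hc0, combo _ _ _ _ _ _ _ _ hbor]
      have hcorn := corners_canon lines hPre c c0.1 c0.2 hin0 hc0
      simp only [pvLoopA, pvFill, hneigh, hG, hQ, hK, hcorn]
      obtain ⟨ih1, ih2⟩ := ih ((pvNbrs c0.1 c0.2).foldl (pvVisit lines c) (g, rest)).2
        ((pvNbrs c0.1 c0.2).foldl (pvVisit lines c) (g, rest)).1
        (pvDirs.foldl (pvStepA lines c c0.1 c0.2) ([], g, rest, per)).2.2.2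
        (sa + cbFun (pvIsC lines c (c0.1 + 1) c0.2) (pvIsC lines c (c0.1 - 1) c0.2)
          (pvIsC lines c c0.1 (c0.2 + 1)) (pvIsC lines c c0.1 (c0.2 - 1))
          (pvIsC lines c (c0.1 + 1) (c0.2 + 1)) (pvIsC lines c (c0.1 + 1) (c0.2 - 1))
          (pvIsC lines c (c0.1 - 1) (c0.2 + 1)) (pvIsC lines c (c0.1 - 1) (c0.2 - 1)))
        (sb + cbFun (pvIsC lines c (c0.1 + 1) c0.2) (pvIsC lines c (c0.1 - 1) c0.2)
          (pvIsC lines c c0.1 (c0.2 + 1)) (pvIsC lines c c0.1 (c0.2 - 1))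
          (pvIsC lines c (c0.1 + 1) (c0.2 + 1)) (pvIsC lines c (c0.1 + 1) (c0.2 - 1))
          (pvIsC lines c (c0.1 - 1) (c0.2 + 1)) (pvIsC lines c (c0.1 - 1) (c0.2 - 1)))
        hgood
      refine ⟨ih1, ?_⟩
      rw [ih2]
      ring


lemma loopA_nil (lines : List String) (c : Char) (n : Nat) (g : PySem.Set (Int × Int))
    (per side : Int) : pvLoopA lines c n [] g per side = (g, per, side) := by
  cases n <;> rfl

lemma fill_nil (lines : List String) (c : Char) (n : Nat) (g : PySem.Set (Int × Int))
    (s : Int) : pvFill lines c n g [] s = (g, s) := by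
  cases n <;> rfl

lemma setlen_ne_one {α : Type} (l : List α) (a b : α) (ha : a ∈ l) (hb : b ∈ l)
    (hab : a ≠ b) : (PySem.Set.len l == 1) = false := by
  have h2 : 1 < l.length := by
    match l, ha with
    | [x], ha =>
      simp only [List.mem_singleton] at ha hb
      exact absurd (ha.trans hb.symm) hab
    | x :: y :: rest, _ => simp
  simp only [PySem.Set.len, beq_eq_false_iff_ne, ne_eq]
  omega

lemma dfs_eq (lines : List String) (hPre : Pre_part_2 lines) (x y : Int)
    (hin : pvInB lines x y = true) :
    (dfs lines (x, y)).1
        = (pvFill lines (pvGetc lines x y) (lines.length * (pvW lines).toNat + 1)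
            (PySem.Set.ofList [(x, y)]) [(x, y)] 0).1 ∧
    (dfs lines (x, y)).2.2
        = (pvFill lines (pvGetc lines x y) (lines.length * (pvW lines).toNat + 1)
            (PySem.Set.ofList [(x, y)]) [(x, y)] 0).2 := by
  set c := pvGetc lines x y with hcdef
  by_cases hnb : ∃ d ∈ pvDirs, pvIsC lines c (x + d.1) (y + d.2) = true
  · -- the region has at least two cells: A's singleton override does not fire
    obtain ⟨hl1, hl2⟩ := loop_eq lines hPre c (lines.length * (pvW lines).toNat + 1)
      [(x, y)] (PySem.Set.ofList [(x, y)]) 0 0 0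
      (by
        intro cell hcell
        simp only [List.mem_singleton] at hcell
        subst hcell
        exact ⟨hin, rfl, hnb⟩)
    obtain ⟨d, hd, hdc⟩ := hnb
    have hnbne : (x + d.1, y + d.2) ≠ (x, y) := by
      simp only [pvDirs, List.mem_cons, List.not_mem_nil, or_false] at hd
      rcases hd with rfl | rfl | rfl | rfl <;>
        · simp only [ne_eq, Prod.mk.injEq, not_and]
          intro h
          omega
    have hnbmem : (x + d.1, y + d.2) ∈ (pvFill lines c (lines.length * (pvW lines).toNat + 1)
        (PySem.Set.ofList [(x, y)]) [(x, y)] 0).1 := by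
      show (x + d.1, y + d.2) ∈ (pvFill lines c (lines.length * (pvW lines).toNat) _ _ _).1
      apply fill_garden_mono
      apply visit_garden_of_cond lines c (pvNbrs x y) (PySem.Set.ofList [(x, y)], []) _ _
        (by rw [cellB_beq lines hPre]; exact hdc)
      simp only [pvDirs, List.mem_cons, List.not_mem_nil, or_false] at hd
      rcases hd with rfl | rfl | rfl | rfl <;>
        simp [pvNbrs, show x + (-1 : Int) = x - 1 from by ring,
          show y + (-1 : Int) = y - 1 from by ring]
    have hstartmem : (x, y) ∈ (pvFill lines c (lines.length * (pvW lines).toNat + 1)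
        (PySem.Set.ofList [(x, y)]) [(x, y)] 0).1 := by
      apply fill_garden_mono
      simp [PySem.Set.ofList]
    have hlen := setlen_ne_one _ _ _ hnbmem hstartmem hnbne
    rw [← hl1] at hlen
    simp only [dfs, ← hcdef, hlen, Bool.false_eq_true, if_false]
    exact ⟨hl1, by omega⟩
  · -- a lonely cell: A overrides the side count to 4, B's corner count is 4
    push Not at hnb
    have hnone : ∀ d ∈ pvDirs, pvCond lines c x y d = false := by
      intro d hd
      exact Bool.eq_false_iff.2 fun h => absurd h (by simpa using hnb d hd)
    have hfoldA : pvDirs.foldl (pvStepA lines c x y) ([], PySem.Set.ofList [(x, y)], [], 0)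
        = ([], PySem.Set.ofList [(x, y)], [], 4) := by
      have h1 := hnone (1, 0) (by simp [pvDirs])
      have h2 := hnone (-1, 0) (by simp [pvDirs])
      have h3 := hnone (0, 1) (by simp [pvDirs])
      have h4 := hnone (0, -1) (by simp [pvDirs])
      simp only [pvDirs, List.foldl_cons, List.foldl_nil]
      simp [pvStepA, h1, h2, h3, h4]
    have hfoldB : (pvNbrs x y).foldl (pvVisit lines c) (PySem.Set.ofList [(x, y)], [])
        = (PySem.Set.ofList [(x, y)], []) := by
      have hproj := fold_proj lines hPre c x y pvDirs ([], PySem.Set.ofList [(x, y)], [], 0)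
      rw [← nbrs_eq x y, hfoldA] at hproj
      exact hproj.symm
    have hb1 : pvIsC lines c (x + 1) y = false := by
      have := hnone (1, 0) (by simp [pvDirs]); simpa [pvCond] using this
    have hb2 : pvIsC lines c (x - 1) y = false := by
      have := hnone (-1, 0) (by simp [pvDirs])
      simpa [pvCond, show x + (-1 : Int) = x - 1 from by ring] using this
    have hb3 : pvIsC lines c x (y + 1) = false := by
      have := hnone (0, 1) (by simp [pvDirs]); simpa [pvCond] using this
    have hb4 : pvIsC lines c x (y - 1) = false := by
      have := hnone (0, -1) (by simp [pvDirs])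
      simpa [pvCond, show y + (-1 : Int) = y - 1 from by ring] using this
    constructor
    · show (dfs lines (x, y)).1 = _
      simp only [dfs, pvLoopA, pvFill, ← hcdef, hfoldA, hfoldB, loopA_nil, fill_nil]
      split <;> rfl
    · show (dfs lines (x, y)).2.2 = _
      simp only [dfs, pvLoopA, pvFill, ← hcdef, hfoldA, hfoldB, loopA_nil, fill_nil]
      have hcc : pvCorners lines x y = 4 := by
        rw [corners_canon lines hPre c x y hin rfl, hb1, hb2, hb3, hb4, cbFun_lonely]
      have hlen1 : (PySem.Set.len (PySem.Set.ofList [(x, y)]) == 1) = true := by rfl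
      simp only [hcc, hlen1, if_true]
      norm_num

-- ===== VERDICT (by name: the statement is the Claim_ definition above) =====
theorem part_2_spec : Claim_equal_part_2 := by
  intro lines _hDom hPre
  show part_2 lines = part_2_alt lines
  unfold part_2 part_2_alt
  simp only [gridW_eq]
  congr 1
  apply PySem.List.foldl_congr_mem
  intro acc sx hsx
  apply PySem.List.foldl_congr_mem
  intro st sy hsy
  rw [PySem.List.mem_pyRange_one] at hsx hsy
  have hin : pvInB lines sx sy = true := by
    simp only [pvInB, Bool.and_eq_true, decide_eq_true_eq]
    exact ⟨⟨⟨hsx.1, hsx.2⟩, hsy.1⟩, hsy.2⟩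
  by_cases hcont : PySem.Set.contains st.2 (sx, sy) = true
  · have hm : (sx, sy) ∈ st.2 := by simpa using hcont
    simp [hm]
  · simp only [Bool.not_eq_true] at hcont
    simp only [hcont, Bool.false_eq_true, if_false]
    have hcol : (pvCellB lines sx sy).getD ' ' = pvGetc lines sx sy := by
      rw [cellB_self lines hPre _ sx sy hin rfl]
      rfl
    rw [hcol]
    obtain ⟨e1, e2⟩ := dfs_eq lines hPre sx sy hin
    rw [e1, e2]
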